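-- pv_equiv track=rewrite | github.com/ymrs66/mahjang | meld_checker.py | remove_three_tiles
-- ===== SOURCE A (Python) =====
-- def remove_three_tiles(original_list, val1, val2, val3):
--     """
--     original_list から val1, val2, val3 という値を1枚ずつ取り除いた新リストを返す。
--
--     例えば:
--       - 刻子: val1 == val2 == val3
--       - 順子: val2 == val1+1, val3 == val1+2
--     """
--     new_list = original_list[:]
--
--     # val1, val2, val3 をそれぞれ new_list から1回だけ削除
--     for v in (val1, val2, val3):
--         if v in new_list:
--             new_list.remove(v)
--         else:
--             # v が見つからなければ取り除けない(エラー or そのままリターンなど)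
--             return None  # 取り除き失敗を示す
--
--     return new_list
-- ===== SOURCE B (Python) =====
-- def remove_three_tiles(original_list, val1, val2, val3):
--     # Counter-based: tally how many of each value must go, check availability
--     # once, then drop the earliest owed occurrences in a single pass.
--     need = {}
--     for v in (val1, val2, val3):
--         need[v] = need.get(v, 0) + 1
--     if any(original_list.count(v) < k for v, k in need.items()):
--         return None
--     result = []
--     for x in original_list:
--         if need.get(x, 0) > 0:
--             need[x] = need[x] - 1
--         else:
--             result.append(x)
--     return result
-- ===== Notes on version B (the rewrite author's own statement) =====
-- stated objective: alternative
-- what changed: Replaces the three sequential membership-test-and-remove passes with a counter table built from (val1,val2,val3), one availability check, and a single pass that skips each value while it is still owed a removal.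
import Mathlib
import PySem

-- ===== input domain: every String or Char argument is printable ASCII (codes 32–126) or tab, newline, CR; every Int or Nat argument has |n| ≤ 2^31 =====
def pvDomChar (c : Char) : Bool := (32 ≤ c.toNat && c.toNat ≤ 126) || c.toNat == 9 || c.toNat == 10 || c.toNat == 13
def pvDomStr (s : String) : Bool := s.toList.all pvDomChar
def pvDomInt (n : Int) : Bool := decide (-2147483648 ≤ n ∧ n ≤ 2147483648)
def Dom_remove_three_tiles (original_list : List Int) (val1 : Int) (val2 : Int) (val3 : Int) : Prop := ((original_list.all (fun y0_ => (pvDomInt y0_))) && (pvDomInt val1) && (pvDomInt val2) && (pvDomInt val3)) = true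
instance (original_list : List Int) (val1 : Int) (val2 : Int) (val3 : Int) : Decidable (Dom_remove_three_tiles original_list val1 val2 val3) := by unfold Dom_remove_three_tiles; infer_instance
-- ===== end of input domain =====

-- B replaces A's three sequential remove passes by a counter table, one availability
-- check and a single skip-while-owed pass (alternative algorithm, same return value).


-- ===== PORT A =====
-- one iteration of A's 'for v in (val1, val2, val3)' loop ('return None' = staying none)
def rttStep (acc : Option (List Int)) (v : Int) : Option (List Int) :=
  match acc with
  | none => none
  | some nl => if nl.contains v then PySem.List.remove? nl v else none

def remove_three_tiles (original_list : List Int) (val1 : Int) (val2 : Int) (val3 : Int) : Option (List Int) :=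
  [val1, val2, val3].foldl rttStep (some original_list)

-- ===== PORT B =====
-- Source B's result loop: skip x while it is still owed a removal, else keep it
def rttPass (need : PySem.Dict Int Int) : List Int → List Int
  | [] => []
  | x :: xs =>
    if 0 < need.getD x 0 then rttPass (need.insert x (need.getD x 0 - 1)) xs
    else x :: rttPass need xs

def remove_three_tiles_alt (original_list : List Int) (val1 : Int) (val2 : Int) (val3 : Int) : Option (List Int) :=
  let need := [val1, val2, val3].foldl (fun d v => d.insert v (d.getD v 0 + 1)) PySem.Dict.empty
  if need.items.any (fun p => (PySem.List.count original_list p.1 : Int) < p.2) then none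
  else some (rttPass need original_list)

-- ===== PRECONDITION & SPEC =====
def Spec_remove_three_tiles (original_list : List Int) (val1 : Int) (val2 : Int) (val3 : Int) (out : Option (List Int)) : Prop := out = remove_three_tiles_alt original_list val1 val2 val3
instance (original_list : List Int) (val1 : Int) (val2 : Int) (val3 : Int) (out : Option (List Int)) : Decidable (Spec_remove_three_tiles original_list val1 val2 val3 out) := by unfold Spec_remove_three_tiles; infer_instance

-- ===== CLAIM (what is proved, stated in full; the proofs are below) =====
def Claim_equal_remove_three_tiles : Prop := ∀ (original_list : List Int) (val1 : Int) (val2 : Int) (val3 : Int), Dom_remove_three_tiles original_list val1 val2 val3 → Spec_remove_three_tiles original_list val1 val2 val3 (remove_three_tiles original_list val1 val2 val3)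

-- ===== LEMMAS AND PROOFS =====

-- the pass only depends on the counts the dict answers, not on its layout
theorem rttPass_congr (d d' : PySem.Dict Int Int) (xs : List Int)
    (h : ∀ k, d.getD k 0 = d'.getD k 0) : rttPass d xs = rttPass d' xs := by
  induction xs generalizing d d' with
  | nil => rfl
  | cons x xs ih =>
    simp only [rttPass, h x]
    split
    · refine ih _ _ (fun k => ?_)
      by_cases hk : k = x
      · subst hk
        simp [PySem.Dict.getD_insert_self]
      · simp [PySem.Dict.getD_insert_of_ne _ _ _ hk, h k]
    · rw [ih _ _ h]

-- a dict owing nothing removes nothing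
theorem rttPass_zero (d : PySem.Dict Int Int) (h : ∀ k, d.getD k 0 ≤ 0) (xs : List Int) :
    rttPass d xs = xs := by
  induction xs with
  | nil => rfl
  | cons x xs ih =>
    simp only [rttPass]
    rw [if_neg (by have := h x; omega)]
    rw [ih]

-- owing one more copy of v is the same as erasing v's first occurrence up front
theorem rttPass_bump (d : PySem.Dict Int Int) (v : Int) (xs : List Int)
    (hv : v ∈ xs) (h0 : 0 ≤ d.getD v 0) :
    rttPass (d.insert v (d.getD v 0 + 1)) xs = rttPass d (xs.erase v) := by
  induction xs generalizing d with
  | nil => cases hv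
  | cons x xs ih =>
    by_cases hx : x = v
    · subst hx
      simp only [rttPass, List.erase_cons_head]
      rw [if_pos (by rw [PySem.Dict.getD_insert_self]; omega)]
      refine rttPass_congr _ _ _ (fun k => ?_)
      by_cases hk : k = x
      · subst hk
        simp [PySem.Dict.getD_insert_self]
      · simp [PySem.Dict.getD_insert_of_ne _ _ _ hk]
    · have hv' : v ∈ xs := by
        rcases List.mem_cons.mp hv with h | h
        · exact absurd h.symm hx
        · exact h
      have hxe : (x :: xs).erase v = x :: xs.erase v :=
        List.erase_cons_tail (by simp [hx])
      simp only [rttPass, hxe,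
        PySem.Dict.getD_insert_of_ne _ _ _ hx]
      by_cases hc : 0 < d.getD x 0
      · rw [if_pos hc, if_pos hc]
        have step :
            rttPass ((d.insert v (d.getD v 0 + 1)).insert x (d.getD x 0 - 1)) xs
            = rttPass ((d.insert x (d.getD x 0 - 1)).insert v
                ((d.insert x (d.getD x 0 - 1)).getD v 0 + 1)) xs := by
          refine rttPass_congr _ _ _ (fun k => ?_)
          by_cases hk : k = x
          · subst hk
            simp [PySem.Dict.getD_insert_self,
              PySem.Dict.getD_insert_of_ne _ _ _ hx]
          · by_cases hkv : k = v
            · subst hkv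
              simp [PySem.Dict.getD_insert_of_ne _ _ _ hk,
                PySem.Dict.getD_insert_self]
            · simp [PySem.Dict.getD_insert_of_ne _ _ _ hk,
                PySem.Dict.getD_insert_of_ne _ _ _ hkv]
        rw [step, ih _ hv'
          (by rw [PySem.Dict.getD_insert_of_ne _ _ _ (Ne.symm hx)]; exact h0)]
      · rw [if_neg hc, if_neg hc, ih d hv' h0]

-- once A has returned None it stays None through the remaining iterations
theorem foldl_rttStep_none (vs : List Int) : List.foldl rttStep none vs = none := by
  induction vs with
  | nil => rfl
  | cons a as ihn => simpa [rttStep] using ihn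

-- A's fold computes exactly B's counter test and pass, for ANY list of values
theorem rtt_main (vs l : List Int) :
    List.foldl rttStep (some l) vs =
      if ∀ w ∈ vs, List.count w vs ≤ List.count w l then
        some (rttPass (PySem.Dict.counter vs) l) else none := by
  induction vs generalizing l with
  | nil =>
    simp only [List.foldl_nil]
    rw [if_pos (by simp)]
    rw [rttPass_zero _ (fun k => by simp [PySem.Dict.getD_counter]) l]
  | cons v vs ih =>
    simp only [List.foldl_cons]
    by_cases hvl : v ∈ l
    · have hstep : rttStep (some l) v = some (l.erase v) := by
        simp only [rttStep]
        rw [if_pos (by simpa using hvl), PySem.List.remove?_eq_some_erase l v hvl]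
      rw [hstep, ih (l.erase v)]
      have hcnt : ∀ w, List.count w (l.erase v) =
          List.count w l - (if v = w then 1 else 0) := by
        intro w; rw [List.count_erase]; simp
      have key : ∀ w, List.count w (l.erase v) =
          List.count w l - (if v = w then 1 else 0) := by
        intro w; rw [List.count_erase]
        congr 1
        simp [beq_iff_eq]
      have kc : ∀ w, List.count w (v :: vs) =
          List.count w vs + (if v = w then 1 else 0) := by
        intro w; rw [List.count_cons]
        congr 1
        simp [beq_iff_eq]
      have h1 : 1 ≤ List.count v l := List.one_le_count_iff.mpr hvl
      -- condition bookkeeping: one copy of v moves from the list side to the demand side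
      have hcond : (∀ w ∈ vs, List.count w vs ≤ List.count w (l.erase v)) ↔
          (∀ w ∈ v :: vs, List.count w (v :: vs) ≤ List.count w l) := by
        constructor
        · intro h w hw
          rw [kc w]
          rcases List.mem_cons.mp hw with rfl | hw'
          · rw [if_pos rfl]
            by_cases hv : w ∈ vs
            · have h2 := h w hv; rw [key w, if_pos rfl] at h2; omega
            · rw [List.count_eq_zero_of_not_mem hv]; omega
          · have h2 := h w hw'
            rw [key w] at h2
            by_cases hvw : v = w
            · rw [if_pos hvw] at h2 ⊢; subst hvw; omega
            · rw [if_neg hvw] at h2 ⊢; omega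
        · intro h w hw
          have h2 := h w (List.mem_cons_of_mem v hw)
          rw [kc w] at h2
          rw [key w]
          by_cases hvw : v = w
          · rw [if_pos hvw] at h2 ⊢; omega
          · rw [if_neg hvw] at h2 ⊢; omega
      by_cases hC : ∀ w ∈ v :: vs, List.count w (v :: vs) ≤ List.count w l
      · rw [if_pos (hcond.mpr hC), if_pos hC]
        congr 1
        have hbump :
            rttPass (PySem.Dict.counter (v :: vs)) l =
            rttPass ((PySem.Dict.counter vs).insert v
              ((PySem.Dict.counter vs).getD v 0 + 1)) l := by
          refine rttPass_congr _ _ _ (fun k => ?_)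
          by_cases hk : k = v
          · subst hk
            simp [PySem.Dict.getD_counter, PySem.Dict.getD_insert_self]
          · rw [PySem.Dict.getD_insert_of_ne _ _ _ hk]
            have hne : v ≠ k := fun h => hk h.symm
            simp only [PySem.Dict.getD_counter, kc k]
            rw [if_neg hne]
            simp
        rw [hbump, rttPass_bump _ _ _ hvl
          (by rw [PySem.Dict.getD_counter]; positivity)]
      · rw [if_neg (fun h => hC (hcond.mp h)), if_neg hC]
    · have hstep : rttStep (some l) v = none := by
        simp only [rttStep]
        rw [if_neg (by simpa using hvl)]
      rw [hstep, foldl_rttStep_none, if_neg]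
      intro h
      have h2 := h v List.mem_cons_self
      rw [List.count_eq_zero_of_not_mem hvl, List.count_cons] at h2
      simp at h2

-- B's item-based availability test is the count condition of rtt_main
theorem alt_eq (l : List Int) (v1 v2 v3 : Int) :
    remove_three_tiles_alt l v1 v2 v3 =
      if ∀ w ∈ [v1, v2, v3], List.count w [v1, v2, v3] ≤ List.count w l then
        some (rttPass (PySem.Dict.counter [v1, v2, v3]) l) else none := by
  have hz : remove_three_tiles_alt l v1 v2 v3 =
      (if ((PySem.Dict.counter [v1, v2, v3]).items.any
            fun p => decide ((PySem.List.count l p.1 : Int) < p.2)) = true then none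
       else some (rttPass (PySem.Dict.counter [v1, v2, v3]) l)) := rfl
  rw [hz, PySem.Dict.items_counter]
  by_cases hC : ∀ w ∈ [v1, v2, v3], List.count w [v1, v2, v3] ≤ List.count w l
  · rw [if_pos hC]
    rw [if_neg]
    simp only [List.any_map, List.any_eq_true, Function.comp]
    rintro ⟨k, hk, hlt⟩
    have hkmem : k ∈ [v1, v2, v3] := (PySem.Set.mem_ofList _ _).mp hk
    have := hC k hkmem
    rw [PySem.List.count_eq] at hlt
    simp only [decide_eq_true_eq] at hlt
    omega
  · rw [if_neg hC, if_pos]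
    simp only [not_forall, not_le] at hC
    rcases hC with ⟨w, hw, hlt⟩
    simp only [List.any_map, List.any_eq_true, Function.comp]
    refine ⟨w, (PySem.Set.mem_ofList _ _).mpr hw, ?_⟩
    rw [PySem.List.count_eq]
    simp only [decide_eq_true_eq]
    omega

-- ===== VERDICT (by name: the statement is the Claim_ definition above) =====
theorem remove_three_tiles_spec : Claim_equal_remove_three_tiles := by
  intro l v1 v2 v3 _
  show remove_three_tiles l v1 v2 v3 = remove_three_tiles_alt l v1 v2 v3
  rw [alt_eq]
  exact rtt_main [v1, v2, v3] l
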